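-- pv_equiv track=rewrite | github.com/viktorijakm/python_homework | assignment1/assignment1.py | titleize
-- ===== SOURCE A (Python) =====
-- def titleize( text ):
--     little_words = {"a", "on", "an", "the", "of", "and", "is", "in"}
--     words = text.split()
--
--     for i, word in enumerate(words):
--         if i == 0 or i == len(words) -1 or word.lower() not  in little_words:
--             words[i] = word.capitalize()
--         else:
--             words[i] = word.lower()
--
--     return " ".join(words)
-- ===== SOURCE B (Python) =====
-- def titleize(text):
--     little_words = {"a", "on", "an", "the", "of", "and", "is", "in"}
--     out = ""     # rendered words joined so far (all of them interior-final)
--     prev = None  # most recent complete word, rendering deferred (last-word rule)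
--     cur = ""     # word currently being scanned
--     for ch in text + " ":   # sentinel space flushes the final word
--         if ch.isspace():
--             if cur:
--                 if prev is not None:
--                     low = prev.lower()
--                     w = low if out and low in little_words else prev.capitalize()
--                     out = out + " " + w if out else w
--                 prev, cur = cur, ""
--         else:
--             cur += ch
--     if prev is not None:
--         out = out + " " + prev.capitalize() if out else prev.capitalize()
--     return out
-- ===== Notes on version B (the rewrite author's own statement) =====
-- stated objective: alternative
-- what changed: B replaces A's split-into-a-word-array-and-rewrite-each-slot pass by a single character-level streaming scanner that never calls split(): it accumulates the current word char by char and keeps a one-word lookbehind so each word is rendered (interior little words lowercased, first/last capitalized) the moment the next word starts, appending directly to the output string.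
import Mathlib
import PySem

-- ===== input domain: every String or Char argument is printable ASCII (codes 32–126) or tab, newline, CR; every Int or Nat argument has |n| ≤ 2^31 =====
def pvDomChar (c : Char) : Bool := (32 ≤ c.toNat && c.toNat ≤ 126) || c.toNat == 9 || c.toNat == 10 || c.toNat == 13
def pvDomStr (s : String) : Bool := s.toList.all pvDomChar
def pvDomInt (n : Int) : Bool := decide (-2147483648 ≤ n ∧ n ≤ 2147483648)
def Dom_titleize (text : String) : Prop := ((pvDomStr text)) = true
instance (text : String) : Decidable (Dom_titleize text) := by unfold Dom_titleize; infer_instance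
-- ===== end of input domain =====

-- B is a single character-level streaming scanner (no split(), no word array): it accumulates
-- the current word char by char and keeps a one-word lookbehind so each word is rendered as
-- soon as the next one starts; A splits into a word list and rewrites each slot by index.

-- shared helper: Python's str.capitalize on the char-list level (exact on ASCII)
def pvCapL : List Char → List Char
  | [] => []
  | c :: r => PySem.Chars.upperChar c :: PySem.Chars.lower r

-- Python's str.capitalize on String
def pvCapitalize (s : String) : String := String.ofList (pvCapL s.toList)

def pvLittleStrs : List String := ["a", "on", "an", "the", "of", "and", "is", "in"]

def pvLittle : PySem.Set String := PySem.Set.ofList pvLittleStrs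

-- the same set of little words, held as char lists (B scans characters, never builds Strings)
def pvLittleC : PySem.Set (List Char) := PySem.Set.ofList (pvLittleStrs.map String.toList)

-- ===== PORT A =====
-- the Python mutates words[i] in place; each index is written once and read before any write,
-- so the fold over enumerate(words) of the initial list with pySetD is exact
def titleize (text : String) : String :=
  let words := PySem.Str.split₀ text
  let final := (PySem.List.enumerate words 0).foldl
    (fun ws q =>
      if q.1 == 0 || q.1 == (words.length : Int) - 1
          || !(PySem.Set.contains pvLittle (PySem.Str.lower q.2)) then
        PySem.List.pySetD ws q.1 (pvCapitalize q.2)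
      else
        PySem.List.pySetD ws q.1 (PySem.Str.lower q.2))
    words
  PySem.Str.join " " final

-- ===== PORT B =====
-- 'low if out and low in little_words else prev.capitalize()'
def altRender (out p : List Char) : List Char :=
  let low := PySem.Chars.lower p
  if !out.isEmpty && PySem.Set.contains pvLittleC low then low else pvCapL p

-- 'out + " " + w if out else w'
def altEmit (out w : List Char) : List Char :=
  if out.isEmpty then w else out ++ ' ' :: w

-- the scanning loop: state (cur, prev, out); cur is accumulated reversed (standard encoding
-- of Python's 'cur += ch') and reversed once at each word boundary
def altGo : List Char → List Char → Option (List Char) → List Char → Option (List Char) × List Char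
  | [], _, prev?, out => (prev?, out)
  | c :: rest, cur, prev?, out =>
    if PySem.Chars.isspace c then
      if cur.isEmpty then altGo rest cur prev? out
      else
        match prev? with
        | none => altGo rest [] (some cur.reverse) out
        | some p => altGo rest [] (some cur.reverse) (altEmit out (altRender out p))
    else altGo rest (c :: cur) prev? out

-- 'if prev is not None: out = out + " " + prev.capitalize() if out else prev.capitalize()'
def altFinish : Option (List Char) × List Char → List Char
  | (none, out) => out
  | (some p, out) => altEmit out (pvCapL p)

def titleize_alt (text : String) : String :=
  String.ofList (altFinish (altGo (text.toList ++ [' ']) [] none []))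

-- ===== PRECONDITION & SPEC =====
def Spec_titleize (text : String) (out : String) : Prop := out = titleize_alt text
instance (text : String) (out : String) : Decidable (Spec_titleize text out) := by unfold Spec_titleize; infer_instance

-- ===== CLAIM (what is proved, stated in full; the proofs are below) =====
def Claim_equal_titleize : Prop := ∀ (text : String), Dom_titleize text → Spec_titleize text (titleize text)

-- ===== LEMMAS AND PROOFS =====

-- word-level reading of B's scanner: feed the words one by one through the lookbehind state
def stepWords : List (List Char) → Option (List Char) → List Char → Option (List Char) × List Char
  | [], prev?, out => (prev?, out)
  | w :: ws, none, out => stepWords ws (some w) out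
  | w :: ws, some p, out => stepWords ws (some w) (altEmit out (altRender out p))

-- interior-word rendering
def pvMidR (p : List Char) : List Char :=
  if PySem.Set.contains pvLittleC (PySem.Chars.lower p) then PySem.Chars.lower p else pvCapL p

-- rendering of the non-first words p :: ws (p interior unless it is also last; last capitalized)
def renderMid : List Char → List (List Char) → List (List Char)
  | p, [] => [pvCapL p]
  | p, w :: ws => pvMidR p :: renderMid w ws

def renderMidL : List (List Char) → List (List Char)
  | [] => []
  | w :: ws => renderMid w ws

-- A's per-slot rewrite on the char-list level (n = number of words)
def pvFC (n : Int) (q : Int × List Char) : List Char :=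
  if q.1 == 0 || q.1 == n - 1 || !(PySem.Set.contains pvLittleC (PySem.Chars.lower q.2)) then
    pvCapL q.2
  else PySem.Chars.lower q.2

theorem pvGoAcc : ∀ (s cur : List Char) (accW : List (List Char)),
    PySem.Chars.split₀.go s cur accW = accW.reverse ++ PySem.Chars.split₀.go s cur [] := by
  intro s
  induction s with
  | nil =>
    intro cur accW
    simp only [PySem.Chars.split₀.go]
    by_cases h : cur.isEmpty
    · simp [h]
    · simp [h]
  | cons c rest ih =>
    intro cur accW
    simp only [PySem.Chars.split₀.go]
    by_cases hs : PySem.Chars.isspace c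
    · by_cases h : cur.isEmpty
      · simp only [hs, h, if_true]
        exact ih [] accW
      · simp only [hs, h, if_true, Bool.false_eq_true, if_false]
        rw [ih [] (cur.reverse :: accW), ih [] [cur.reverse]]
        simp
    · simp only [hs, Bool.false_eq_true, if_false]
      exact ih (c :: cur) accW

theorem pvGoNeNil : ∀ (s cur : List Char) (accW : List (List Char)),
    (∀ w ∈ accW, w ≠ []) → ∀ w ∈ PySem.Chars.split₀.go s cur accW, w ≠ [] := by
  intro s
  induction s with
  | nil =>
    intro cur accW hacc w hw
    simp only [PySem.Chars.split₀.go] at hw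
    by_cases h : cur.isEmpty
    · simp [h] at hw; exact hacc w hw
    · simp [h] at hw
      rcases hw with hw | hw
      · exact hacc w hw
      · subst hw; simpa using (by simpa [List.isEmpty_iff] using h : cur ≠ [])
  | cons c rest ih =>
    intro cur accW hacc w hw
    simp only [PySem.Chars.split₀.go] at hw
    by_cases hs : PySem.Chars.isspace c
    · by_cases h : cur.isEmpty
      · simp only [hs, h, if_true] at hw
        exact ih [] accW hacc w hw
      · simp only [hs, h, if_true, Bool.false_eq_true, if_false] at hw
        refine ih [] (cur.reverse :: accW) ?_ w hw
        intro v hv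
        rcases List.mem_cons.mp hv with hv | hv
        · subst hv; simpa using (by simpa [List.isEmpty_iff] using h : cur ≠ [])
        · exact hacc v hv
    · simp only [hs, Bool.false_eq_true, if_false] at hw
      exact ih (c :: cur) accW hacc w hw

theorem pvAltGoStep : ∀ (s cur : List Char) (prev? : Option (List Char)) (out : List Char),
    altGo (s ++ [' ']) cur prev? out = stepWords (PySem.Chars.split₀.go s cur []) prev? out := by
  intro s
  induction s with
  | nil =>
    intro cur prev? out
    simp only [List.nil_append, altGo, PySem.Chars.split₀.go]
    have hsp : PySem.Chars.isspace ' ' = true := by decide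
    rw [if_pos hsp]
    by_cases h : cur.isEmpty
    · simp [h, stepWords]
    · simp only [h, Bool.false_eq_true, if_false]
      cases prev? with
      | none => simp [stepWords]
      | some p => simp [stepWords]
  | cons c rest ih =>
    intro cur prev? out
    simp only [List.cons_append, altGo, PySem.Chars.split₀.go]
    by_cases hs : PySem.Chars.isspace c
    · by_cases h : cur.isEmpty
      · have hc : cur = [] := List.isEmpty_iff.mp h
        simp only [hs, h, if_true]
        subst hc
        exact ih [] prev? out
      · simp only [hs, h, if_true, Bool.false_eq_true, if_false]
        rw [pvGoAcc rest [] [cur.reverse]]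
        simp only [List.reverse_cons, List.reverse_nil, List.nil_append, List.singleton_append]
        cases prev? with
        | none => rw [stepWords]; exact ih [] (some cur.reverse) out
        | some p => rw [stepWords]; exact ih [] (some cur.reverse) (altEmit out (altRender out p))
    · simp only [hs, Bool.false_eq_true, if_false]
      exact ih (c :: cur) prev? out

theorem pvFinRest : ∀ (ws : List (List Char)) (p out : List Char), out ≠ [] →
    altFinish (stepWords ws (some p) out) = out ++ ' ' :: PySem.Chars.join [' '] (renderMid p ws) := by
  intro ws
  induction ws with
  | nil =>
    intro p out hout
    simp only [stepWords, altFinish, altEmit, renderMid, PySem.Chars.join_singleton]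
    simp [hout]
  | cons w ws ih =>
    intro p out hout
    have hne : out.isEmpty = false := by simp [hout]
    have hr : altRender out p = pvMidR p := by
      simp [altRender, pvMidR, hne]
    have he : altEmit out (altRender out p) = out ++ ' ' :: pvMidR p := by
      simp [altEmit, hne, hr]
    rw [stepWords, he, ih w (out ++ ' ' :: pvMidR p) (by simp)]
    have hcons : ∃ a l, renderMid w ws = a :: l := by
      cases ws with
      | nil => exact ⟨_, _, rfl⟩
      | cons v vs => exact ⟨_, _, rfl⟩
    obtain ⟨a, l, hal⟩ := hcons
    rw [show renderMid p (w :: ws) = pvMidR p :: renderMid w ws from rfl, hal,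
      PySem.Chars.join_cons_cons]
    simp

theorem pvFinFirst : ∀ (ws : List (List Char)) (p : List Char), p ≠ [] →
    altFinish (stepWords ws (some p) []) = PySem.Chars.join [' '] (pvCapL p :: renderMidL ws) := by
  intro ws p hp
  cases ws with
  | nil =>
    simp [stepWords, altFinish, altEmit, renderMidL, PySem.Chars.join_singleton]
  | cons w ws =>
    have hcap : pvCapL p ≠ [] := by
      cases p with
      | nil => exact absurd rfl hp
      | cons c r => simp [pvCapL]
    have hr : altRender [] p = pvCapL p := by simp [altRender]
    rw [stepWords, hr, show altEmit [] (pvCapL p) = pvCapL p from rfl,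
      pvFinRest ws w (pvCapL p) hcap]
    have hcons : ∃ a l, renderMid w ws = a :: l := by
      cases ws with
      | nil => exact ⟨_, _, rfl⟩
      | cons v vs => exact ⟨_, _, rfl⟩
    obtain ⟨a, l, hal⟩ := hcons
    rw [show renderMidL (w :: ws) = renderMid w ws from rfl, hal, PySem.Chars.join_cons_cons]
    simp

theorem pvEnumMapMid : ∀ (ws : List (List Char)) (p : List Char) (s : Nat) (n : Int),
    1 ≤ s → (s : Int) + ws.length + 1 = n →
    (PySem.List.enumerate (p :: ws) (s : Int)).map (pvFC n) = renderMid p ws := by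
  intro ws
  induction ws with
  | nil =>
    intro p s n hs hn
    rw [PySem.List.enumerate_cons, PySem.List.enumerate_nil]
    simp only [List.map_cons, List.map_nil, renderMid]
    have hc : ((s : Int) == 0 || (s : Int) == n - 1
        || !(PySem.Set.contains pvLittleC (PySem.Chars.lower p))) = true := by
      have : (s : Int) = n - 1 := by simp at hn; omega
      simp [this]
    simp only [pvFC, hc, if_true]
  | cons w ws ih =>
    intro p s n hs hn
    rw [PySem.List.enumerate_cons]
    simp only [List.map_cons, renderMid]
    rw [List.cons_eq_cons]
    refine ⟨?_, ?_⟩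
    · have h0 : ((s : Int) == 0) = false := by simp; omega
      have h1 : ((s : Int) == n - 1) = false := by
        simp only [List.length_cons] at hn; push_cast at hn; simp; omega
      simp only [pvFC, h0, h1, Bool.false_or, pvMidR]
      cases hb : PySem.Set.contains pvLittleC (PySem.Chars.lower p) <;>
        simp only [Bool.not_false, Bool.not_true, Bool.false_eq_true, if_true, if_false]
    · have : ((s : Int) + 1) = ((s + 1 : Nat) : Int) := by push_cast; ring
      rw [this]
      refine ih w (s + 1) n (by omega) ?_
      simp only [List.length_cons] at hn; push_cast at hn ⊢; omega

theorem pvEnumMapFC : ∀ (w : List Char) (ws : List (List Char)),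
    (PySem.List.enumerate (w :: ws) 0).map (pvFC ((w :: ws).length : Int))
      = pvCapL w :: renderMidL ws := by
  intro w ws
  rw [PySem.List.enumerate_cons]
  simp only [List.map_cons]
  rw [List.cons_eq_cons]
  refine ⟨?_, ?_⟩
  · simp [pvFC]
  · cases ws with
    | nil => simp [PySem.List.enumerate_nil, renderMidL]
    | cons p rest =>
      show (PySem.List.enumerate (p :: rest) ((1 : Nat) : Int)).map _ = renderMid p rest
      refine pvEnumMapMid rest p 1 _ (by omega) ?_
      simp only [List.length_cons]; push_cast; ring

-- A-side machinery (mutating loop = map over enumerate)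
theorem pvSetAppendMid (p : List String) (v x : String) (xs : List String) :
    (p ++ x :: xs).set p.length v = p ++ v :: xs := by
  induction p with
  | nil => simp
  | cons a p ih => simp [ih]

theorem pvFoldlEnumSet (f : Int → String → String) :
    ∀ (xs p : List String),
      (PySem.List.enumerate xs (p.length : Int)).foldl
        (fun ws q => PySem.List.pySetD ws q.1 (f q.1 q.2)) (p ++ xs)
      = p ++ (PySem.List.enumerate xs (p.length : Int)).map (fun q => f q.1 q.2) := by
  intro xs
  induction xs with
  | nil => intro p; simp [PySem.List.enumerate_nil]
  | cons x xs ih =>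
    intro p
    rw [PySem.List.enumerate_cons]
    simp only [List.foldl_cons, List.map_cons]
    rw [PySem.List.pySetD_natCast, pvSetAppendMid]
    have hp : ((p ++ [f (p.length : Int) x]).length : Int) = (p.length : Int) + 1 := by
      simp
    have := ih (p ++ [f (p.length : Int) x])
    rw [hp] at this
    rw [show p ++ f (p.length : Int) x :: xs = (p ++ [f (p.length : Int) x]) ++ xs by simp]
    rw [this]
    simp

theorem pvEnumerateMap {α β : Type} (f : α → β) :
    ∀ (xs : List α) (s : Int),
      PySem.List.enumerate (xs.map f) s = (PySem.List.enumerate xs s).map (fun q => (q.1, f q.2)) := by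
  intro xs
  induction xs with
  | nil => intro s; simp [PySem.List.enumerate_nil]
  | cons x xs ih => intro s; simp [PySem.List.enumerate_cons, ih]

-- membership in the little-word set transfers between the String and char-list levels
theorem pvOfListMem (l : List Char) :
    (String.ofList l ∈ pvLittleStrs) ↔ l ∈ pvLittleStrs.map String.toList := by
  rw [List.mem_map]
  constructor
  · intro h; exact ⟨String.ofList l, h, by simp⟩
  · rintro ⟨t, ht, rfl⟩; simpa using ht

theorem pvContLittle (l : List Char) :
    PySem.Set.contains pvLittle (String.ofList l) = PySem.Set.contains pvLittleC l := by
  have h : PySem.Set.contains pvLittle (String.ofList l) = true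
      ↔ PySem.Set.contains pvLittleC l = true := by
    rw [PySem.Set.contains_iff, PySem.Set.contains_iff, pvLittle, pvLittleC,
      PySem.Set.mem_ofList, PySem.Set.mem_ofList]
    exact pvOfListMem l
  cases hb : PySem.Set.contains pvLittleC l
  · rw [Bool.eq_false_iff]
    intro hc
    rw [hb] at h
    exact absurd (h.mp hc) (by simp)
  · exact h.mpr hb

theorem pvStrLowerOfList (l : List Char) :
    PySem.Str.lower (String.ofList l) = String.ofList (PySem.Chars.lower l) := by
  apply String.toList_inj.mp
  simp

theorem pvFStoList (n : Int) (i : Int) (l : List Char) :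
    (if i == 0 || i == n - 1
        || !(PySem.Set.contains pvLittle (PySem.Str.lower (String.ofList l))) then
      pvCapitalize (String.ofList l)
    else PySem.Str.lower (String.ofList l)).toList = pvFC n (i, l) := by
  rw [pvStrLowerOfList, pvContLittle]
  rw [apply_ite String.toList]
  simp [pvFC, pvCapitalize]

-- ===== VERDICT (by name: the statement is the Claim_ definition above) =====
theorem titleize_spec : Claim_equal_titleize := by
  unfold Claim_equal_titleize
  intro text _
  unfold Spec_titleize
  apply String.toList_inj.mp
  simp only [titleize, titleize_alt]
  -- A: the mutating loop is a map over enumerate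
  have hbody : (fun (ws' : List String) (q : Int × String) =>
      if q.1 == 0 || q.1 == ((PySem.Str.split₀ text).length : Int) - 1
          || !(PySem.Set.contains pvLittle (PySem.Str.lower q.2)) then
        PySem.List.pySetD ws' q.1 (pvCapitalize q.2)
      else
        PySem.List.pySetD ws' q.1 (PySem.Str.lower q.2))
    = fun ws' q => PySem.List.pySetD ws' q.1
        (if q.1 == 0 || q.1 == ((PySem.Str.split₀ text).length : Int) - 1
            || !(PySem.Set.contains pvLittle (PySem.Str.lower q.2)) then
          pvCapitalize q.2 else PySem.Str.lower q.2) := by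
    funext ws' q
    exact (apply_ite (PySem.List.pySetD ws' q.1) _ _ _).symm
  rw [hbody]
  have hA := pvFoldlEnumSet (fun i x =>
    if i == 0 || i == ((PySem.Str.split₀ text).length : Int) - 1
        || !(PySem.Set.contains pvLittle (PySem.Str.lower x)) then
      pvCapitalize x else PySem.Str.lower x) (PySem.Str.split₀ text) []
  simp only [List.length_nil, Nat.cast_zero, List.nil_append] at hA
  rw [hA]
  -- B: the scanner is stepWords over the words of split₀
  rw [pvAltGoStep text.toList [] none []]
  -- words of A = words of B
  have hsplit : PySem.Str.split₀ text
      = (PySem.Chars.split₀ text.toList).map String.ofList := rfl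
  rw [hsplit]
  cases hw : PySem.Chars.split₀ text.toList with
  | nil =>
    simp [PySem.Chars.split₀] at hw
    rw [hw]
    simp [PySem.List.enumerate_nil, stepWords, altFinish, PySem.Str.join]
  | cons w ws =>
    -- the word list has no empty word
    have hne : w ≠ [] := by
      refine pvGoNeNil text.toList [] [] (by simp) w ?_
      rw [show PySem.Chars.split₀.go text.toList [] [] = PySem.Chars.split₀ text.toList from rfl,
        hw]
      exact List.mem_cons_self
    simp only [PySem.Chars.split₀] at hw
    rw [hw]
    -- A side down to chars
    rw [PySem.Str.toList_join, pvEnumerateMap String.ofList (w :: ws) 0]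
    simp only [List.map_map]
    have hmap : ((PySem.List.enumerate (w :: ws) 0).map
        (String.toList ∘ (fun x =>
          if x.1 == 0 || x.1 == (((w :: ws).map String.ofList).length : Int) - 1
              || !(PySem.Set.contains pvLittle (PySem.Str.lower x.2)) then
            pvCapitalize x.2 else PySem.Str.lower x.2) ∘ (fun q => (q.1, String.ofList q.2))))
        = (PySem.List.enumerate (w :: ws) 0).map (pvFC (((w :: ws).length : Int))) := by
      apply List.map_congr_left
      intro q _
      simp only [Function.comp_apply, List.length_map]
      exact pvFStoList ((w :: ws).length : Int) q.1 q.2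
    rw [hmap, pvEnumMapFC w ws]
    -- B side
    rw [show stepWords (w :: ws) none [] = stepWords ws (some w) [] from rfl,
      pvFinFirst ws w hne]
    simp
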